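-- pv_equiv track=rewrite | github.com/MrBrantCode/unitest_baseline | mut_generate/mist_train_cf/cf_73577/solution.py | delete_index_3d
-- ===== SOURCE A (Python) =====
-- def delete_index_3d(array, index):
--     newArr = []
--     for i in range(len(array)):
--         if i == index[0]:
--             newSubArr = []
--             for j in range(len(array[i])):
--                 if j == index[1]:
--                     newSubSubArr = []
--                     for k in range(len(array[i][j])):
--                         if k != index[2]:
--                             newSubSubArr.append(array[i][j][k])
--                     newSubArr.append(newSubSubArr)
--                 else:
--                     newSubArr.append(array[i][j])
--             newArr.append(newSubArr)
--         else:
--             newArr.append(array[i])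
--     return newArr
-- ===== SOURCE B (Python) =====
-- def delete_index_3d(array, index):
--     # Recursive descent with a depth counter: rebuild each level from
--     # enumerate(), recursing only into the selected position; delete at depth 2.
--     def go(arr, d):
--         if d == 2:
--             return [x for pos, x in enumerate(arr) if pos != index[2]]
--         return [go(x, d + 1) if pos == index[d] else x for pos, x in enumerate(arr)]
--     return go(array, 0)
-- ===== Notes on version B (the rewrite author's own statement) =====
-- stated objective: alternative
-- what changed: Replaces A's three hand-unrolled nested index loops with one recursive helper that walks the index path with a depth counter, rebuilding each level from enumerate() and filtering only at the last level.
import Mathlib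
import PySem

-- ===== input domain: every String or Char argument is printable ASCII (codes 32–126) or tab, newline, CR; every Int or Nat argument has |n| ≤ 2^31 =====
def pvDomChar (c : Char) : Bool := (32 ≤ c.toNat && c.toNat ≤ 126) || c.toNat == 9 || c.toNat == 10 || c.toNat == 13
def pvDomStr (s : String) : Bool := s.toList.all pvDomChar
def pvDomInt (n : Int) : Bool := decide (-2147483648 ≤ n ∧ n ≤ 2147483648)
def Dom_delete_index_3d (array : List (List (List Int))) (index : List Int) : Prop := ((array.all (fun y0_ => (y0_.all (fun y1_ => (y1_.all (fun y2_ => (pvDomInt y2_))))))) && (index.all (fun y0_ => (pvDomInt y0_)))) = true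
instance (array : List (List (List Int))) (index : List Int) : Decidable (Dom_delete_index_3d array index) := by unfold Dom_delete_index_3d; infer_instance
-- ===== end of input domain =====

-- B rebuilds the three levels by a recursive descent with a depth counter instead of A's three nested index loops.

-- ===== PORT A =====
def pvA_lvl3 (sub : List Int) (i2 : Int) : List Int :=
  (PySem.List.pyRange 0 sub.length 1).foldl
    (fun acc k => if k ≠ i2 then acc ++ [PySem.List.pyGetD sub k 0] else acc) []

def pvA_lvl2 (mid : List (List Int)) (index : List Int) : List (List Int) :=
  (PySem.List.pyRange 0 mid.length 1).foldl
    (fun acc j =>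
      if j = PySem.List.pyGetD index 1 0 then
        acc ++ [pvA_lvl3 (PySem.List.pyGetD mid j []) (PySem.List.pyGetD index 2 0)]
      else acc ++ [PySem.List.pyGetD mid j []]) []

def delete_index_3d (array : List (List (List Int))) (index : List Int) : List (List (List Int)) :=
  (PySem.List.pyRange 0 array.length 1).foldl
    (fun acc i =>
      if i = PySem.List.pyGetD index 0 0 then
        acc ++ [pvA_lvl2 (PySem.List.pyGetD array i []) index]
      else acc ++ [PySem.List.pyGetD array i []]) []

-- ===== PORT B =====
def pvB_go2 (index : List Int) (arr : List Int) : List Int :=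
  ((PySem.List.enumerate arr).filter (fun p => p.1 ≠ PySem.List.pyGetD index 2 0)).map (·.2)

def pvB_go1 (index : List Int) (arr : List (List Int)) : List (List Int) :=
  (PySem.List.enumerate arr).map
    (fun p => if p.1 = PySem.List.pyGetD index 1 0 then pvB_go2 index p.2 else p.2)

def delete_index_3d_alt (array : List (List (List Int))) (index : List Int) : List (List (List Int)) :=
  (PySem.List.enumerate array).map
    (fun p => if p.1 = PySem.List.pyGetD index 0 0 then pvB_go1 index p.2 else p.2)

-- ===== PRECONDITION & SPEC =====
-- Pre_ excludes exactly the inputs where Python A raises IndexError reading index[0]/index[1]/index[2]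
-- (index too short while the corresponding lazily-reached comparison is actually evaluated); B raises there too.
def pvHit1 (array : List (List (List Int))) (index : List Int) : Prop :=
  0 ≤ PySem.List.pyGetD index 0 0 ∧ PySem.List.pyGetD index 0 0 < (array.length : Int) ∧
    PySem.List.pyGetD array (PySem.List.pyGetD index 0 0) [] ≠ []

def pvHit2 (array : List (List (List Int))) (index : List Int) : Prop :=
  pvHit1 array index ∧
  0 ≤ PySem.List.pyGetD index 1 0 ∧
  PySem.List.pyGetD index 1 0 < ((PySem.List.pyGetD array (PySem.List.pyGetD index 0 0) []).length : Int) ∧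
  PySem.List.pyGetD (PySem.List.pyGetD array (PySem.List.pyGetD index 0 0) []) (PySem.List.pyGetD index 1 0) [] ≠ []

def Pre_delete_index_3d (array : List (List (List Int))) (index : List Int) : Prop :=
  (array = [] ∨ 1 ≤ index.length) ∧ (pvHit1 array index → 2 ≤ index.length) ∧ (pvHit2 array index → 3 ≤ index.length)

instance (array : List (List (List Int))) (index : List Int) : Decidable (Pre_delete_index_3d array index) := by
  unfold Pre_delete_index_3d pvHit2 pvHit1; infer_instance

def pvWitness_delete_index_3d : List (List (List Int)) × List Int := ([[[1, 2], [3]]], [0, 0, 1])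

def Spec_delete_index_3d (array : List (List (List Int))) (index : List Int) (out : List (List (List Int))) : Prop := out = delete_index_3d_alt array index
instance (array : List (List (List Int))) (index : List Int) (out : List (List (List Int))) : Decidable (Spec_delete_index_3d array index out) := by unfold Spec_delete_index_3d; infer_instance

-- ===== CLAIM (what is proved, stated in full; the proofs are below) =====
def Claim_equal_delete_index_3d : Prop := ∀ (array : List (List (List Int))) (index : List Int), Dom_delete_index_3d array index → Pre_delete_index_3d array index → Spec_delete_index_3d array index (delete_index_3d array index)

-- ===== LEMMAS AND PROOFS =====

-- 'append one of two elements each step' foldl is a map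
theorem foldl_append_ite_map {α β : Type} (p : α → Prop) [DecidablePred p] (f g : α → β) :
    ∀ (l : List α) (init : List β),
      l.foldl (fun acc x => if p x then acc ++ [f x] else acc ++ [g x]) init
        = init ++ l.map (fun x => if p x then f x else g x) := by
  intro l
  induction l with
  | nil => simp
  | cons a t ih =>
    intro init
    by_cases h : p a <;> simp [h, ih, List.append_assoc]

theorem foldl_append_ite_filter {α β : Type} (p : α → Prop) [DecidablePred p] (f : α → β) :
    ∀ (l : List α) (init : List β),
      l.foldl (fun acc x => if p x then acc ++ [f x] else acc) init
        = init ++ (l.filter (fun x => decide (p x))).map f := by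
  intro l
  induction l with
  | nil => simp
  | cons a t ih =>
    intro init
    by_cases h : p a <;> simp [h, ih, List.append_assoc]

theorem lvl3_eq (index : List Int) (sub : List Int) :
    pvA_lvl3 sub (PySem.List.pyGetD index 2 0) = pvB_go2 index sub := by
  unfold pvA_lvl3 pvB_go2
  rw [foldl_append_ite_filter (fun k => k ≠ PySem.List.pyGetD index 2 0),
      PySem.List.enumerate_eq_map_pyRange (d := 0), List.filter_map, List.map_map]
  rfl

theorem lvl2_eq (index : List Int) (mid : List (List Int)) :
    pvA_lvl2 mid index = pvB_go1 index mid := by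
  unfold pvA_lvl2 pvB_go1
  rw [foldl_append_ite_map (fun j => j = PySem.List.pyGetD index 1 0),
      PySem.List.enumerate_eq_map_pyRange (d := []), List.map_map]
  simp [lvl3_eq]

-- ===== VERDICT (by name: the statement is the Claim_ definition above) =====
theorem delete_index_3d_spec : Claim_equal_delete_index_3d := by
  intro array index _ _
  unfold Spec_delete_index_3d delete_index_3d delete_index_3d_alt
  rw [foldl_append_ite_map (fun i => i = PySem.List.pyGetD index 0 0),
      PySem.List.enumerate_eq_map_pyRange (d := []), List.map_map]
  simp [lvl2_eq]
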